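-- pv_equiv track=rewrite | github.com/omri2861/Bulldog | Bulldog/encryption.py | add_padding
-- ===== SOURCE A (Python) =====
-- PADDING = 'o'
--
-- def add_padding(text, block_size=16):
--     """
--     Adds padding to the given string so that it's length is dividable by 16 and can be encrypted.
--     :param text: str. The string which should be padded
--     :param block_size: The _size of each block in the encryption.
--     :return: str. The string with padding.
--     """
--     if len(text) % block_size == 0:
--         return text
--     padding_length = block_size - (len(text) % block_size)
--     padded_text = text
--     while padding_length != 0:
--         padded_text += PADDING
--         padding_length -= 1
--     return padded_text
-- ===== SOURCE B (Python) =====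
-- PADDING = 'o'
--
-- def add_padding(text, block_size=16):
--     padding_length = (block_size - len(text) % block_size) % block_size
--     return text + PADDING * padding_length
-- ===== Notes on version B (the rewrite author's own statement) =====
-- stated objective: simpler
-- what changed: Replaces the early-return branch and the one-character-at-a-time while loop with a single closed-form expression: pad length ((block_size - len(text) % block_size) % block_size) and one string multiplication.
import Mathlib
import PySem

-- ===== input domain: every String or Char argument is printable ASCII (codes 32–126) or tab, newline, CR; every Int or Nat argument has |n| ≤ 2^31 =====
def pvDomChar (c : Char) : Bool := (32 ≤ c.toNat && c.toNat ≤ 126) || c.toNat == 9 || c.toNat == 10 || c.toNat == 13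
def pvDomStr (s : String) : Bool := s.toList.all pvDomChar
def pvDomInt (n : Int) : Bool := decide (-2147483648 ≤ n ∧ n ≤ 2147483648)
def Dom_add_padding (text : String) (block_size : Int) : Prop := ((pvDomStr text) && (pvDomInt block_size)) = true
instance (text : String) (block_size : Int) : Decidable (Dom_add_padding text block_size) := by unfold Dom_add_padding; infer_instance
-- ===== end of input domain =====

-- B replaces A's early return and per-character while loop by one closed-form pad
-- length ((block_size - len % block_size) % block_size) and a single concatenation.


-- ===== PORT A =====
-- 'while padding_length != 0: padded_text += PADDING; padding_length -= 1'.
-- The Python loop diverges for negative padding_length; Pre_ excludes those inputs,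
-- so the loop is run on its .toNat fuel (exact for every non-negative padding_length).
def pvPadLoop (padded_text : List Char) (padding_length : Nat) : List Char :=
  match padding_length with
  | 0 => padded_text
  | n + 1 => pvPadLoop (padded_text ++ ['o']) n

def add_padding (text : String) (block_size : Int) : String :=
  if PySem.Int.mod (PySem.Str.len text) block_size = 0 then text
  else
    let padding_length := block_size - PySem.Int.mod (PySem.Str.len text) block_size
    String.ofList (pvPadLoop text.toList padding_length.toNat)

-- ===== PORT B =====
def add_padding_alt (text : String) (block_size : Int) : String :=
  let padding_length :=
    PySem.Int.mod (block_size - PySem.Int.mod (PySem.Str.len text) block_size) block_size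
  String.ofList (text.toList ++ PySem.List.pyRepeat ['o'] padding_length)

-- ===== PRECONDITION & SPEC =====
-- Pre_ excludes block_size = 0 (A raises ZeroDivisionError) and negative block_size with
-- unaligned text (A's while loop never terminates); A returns on everything admitted.
def Pre_add_padding (text : String) (block_size : Int) : Prop :=
  block_size ≠ 0 ∧
    (0 < block_size ∨ PySem.Int.mod (PySem.Str.len text) block_size = 0)
instance (text : String) (block_size : Int) : Decidable (Pre_add_padding text block_size) := by
  unfold Pre_add_padding; infer_instance

def pvWitness_add_padding : String × Int := ("hello", 4)

def Spec_add_padding (text : String) (block_size : Int) (out : String) : Prop := out = add_padding_alt text block_size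
instance (text : String) (block_size : Int) (out : String) : Decidable (Spec_add_padding text block_size out) := by unfold Spec_add_padding; infer_instance

-- ===== CLAIM (what is proved, stated in full; the proofs are below) =====
def Claim_equal_add_padding : Prop := ∀ (text : String) (block_size : Int), Dom_add_padding text block_size → Pre_add_padding text block_size → Spec_add_padding text block_size (add_padding text block_size)

-- ===== LEMMAS AND PROOFS =====
theorem pvPadLoop_eq_append (padding_length : Nat) (l : List Char) :
    pvPadLoop l padding_length = l ++ List.replicate padding_length 'o' := by
  induction padding_length generalizing l with
  | zero => simp [pvPadLoop]
  | succ n ih =>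
      simp [pvPadLoop, ih, List.replicate_succ]

-- ===== VERDICT (by name: the statement is the Claim_ definition above) =====
theorem add_padding_spec : Claim_equal_add_padding := by
  intro text block_size _ hpre
  obtain ⟨hb0, hcase⟩ := hpre
  unfold Spec_add_padding add_padding add_padding_alt
  by_cases h : PySem.Int.mod (PySem.Str.len text) block_size = 0
  · -- aligned: both sides return the text unchanged
    have hbb : PySem.Int.mod block_size block_size = 0 :=
      (PySem.Int.mod_eq_zero_iff_dvd _ _).mpr dvd_rfl
    rw [if_pos h, h]
    simp [hbb, PySem.List.pyRepeat]
  · -- unaligned: Pre_ forces 0 < block_size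
    have hbpos : 0 < block_size := by
      rcases hcase with hc | hc
      · exact hc
      · exact absurd hc h
    have hnn := PySem.Int.mod_nonneg (PySem.Str.len text) hbpos
    have hlt := PySem.Int.mod_lt (PySem.Str.len text) hbpos
    set m := PySem.Int.mod (PySem.Str.len text) block_size with hm
    have hmod : PySem.Int.mod (block_size - m) block_size = block_size - m := by
      rw [PySem.Int.mod_eq_emod_of_pos hbpos]
      exact Int.emod_eq_of_lt (by omega) (by omega)
    rw [if_neg h]
    simp [hmod, pvPadLoop_eq_append, PySem.List.pyRepeat_singleton]
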